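-- pv_equiv track=rewrite | github.com/jar0ch0/OpenVegasDeployed | openvegas/games/skill_shot.py | _render_bar
-- ===== SOURCE A (Python) =====
-- def _render_bar(
--     bar_width: int, position: int, ascii_safe: bool,
--     green_zone: list | None = None, gold_zone: list | None = None,
-- ) -> str:
--     """Render the skill shot bar. Zones only shown if provided (post-result)."""
--     chars = []
--     empty = "." if ascii_safe else "░"
--     cursor_char = "V" if ascii_safe else "▼"
--
--     for i in range(bar_width):
--         if i == position:
--             chars.append(f"[bold white on red]{cursor_char}[/bold white on red]")
--         elif gold_zone and gold_zone[0] <= i < gold_zone[1]: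
--             if ascii_safe:
--                 chars.append("#")
--             else:
--                 chars.append("[on yellow] [/on yellow]")
--         elif green_zone and green_zone[0] <= i < green_zone[1]:
--             if ascii_safe:
--                 chars.append("=")
--             else:
--                 chars.append("[on green] [/on green]")
--         else:
--             chars.append(empty)
--     return "".join(chars)
-- ===== SOURCE B (Python) =====
-- def _render_bar(
--     bar_width: int, position: int, ascii_safe: bool,
--     green_zone: list | None = None, gold_zone: list | None = None,
-- ) -> str:
--     """Paint-pass rendering: fill empty cells, overlay green, then gold, then cursor."""
--     empty = "." if ascii_safe else "░"
--     cursor_char = "V" if ascii_safe else "▼"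
--     cells = [empty] * max(0, bar_width)
--     if green_zone:
--         fill = "=" if ascii_safe else "[on green] [/on green]"
--         for i in range(max(0, green_zone[0]), min(bar_width, green_zone[1])):
--             cells[i] = fill
--     if gold_zone:
--         fill = "#" if ascii_safe else "[on yellow] [/on yellow]"
--         for i in range(max(0, gold_zone[0]), min(bar_width, gold_zone[1])):
--             cells[i] = fill
--     if 0 <= position < bar_width:
--         cells[position] = f"[bold white on red]{cursor_char}[/bold white on red]"
--     return "".join(cells)
-- ===== Notes on version B (the rewrite author's own statement) =====
-- stated objective: faster
-- what changed: Replaces A's single loop with a per-cell four-way branch by paint passes: fill a list of empty cells via list repetition, overwrite the clamped green range, then the clamped gold range, then write the cursor cell, and join.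
-- outside the precondition, e.g. on _render_bar(0, 0, True, [5], None): A returns '', B raises IndexError
import Mathlib
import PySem

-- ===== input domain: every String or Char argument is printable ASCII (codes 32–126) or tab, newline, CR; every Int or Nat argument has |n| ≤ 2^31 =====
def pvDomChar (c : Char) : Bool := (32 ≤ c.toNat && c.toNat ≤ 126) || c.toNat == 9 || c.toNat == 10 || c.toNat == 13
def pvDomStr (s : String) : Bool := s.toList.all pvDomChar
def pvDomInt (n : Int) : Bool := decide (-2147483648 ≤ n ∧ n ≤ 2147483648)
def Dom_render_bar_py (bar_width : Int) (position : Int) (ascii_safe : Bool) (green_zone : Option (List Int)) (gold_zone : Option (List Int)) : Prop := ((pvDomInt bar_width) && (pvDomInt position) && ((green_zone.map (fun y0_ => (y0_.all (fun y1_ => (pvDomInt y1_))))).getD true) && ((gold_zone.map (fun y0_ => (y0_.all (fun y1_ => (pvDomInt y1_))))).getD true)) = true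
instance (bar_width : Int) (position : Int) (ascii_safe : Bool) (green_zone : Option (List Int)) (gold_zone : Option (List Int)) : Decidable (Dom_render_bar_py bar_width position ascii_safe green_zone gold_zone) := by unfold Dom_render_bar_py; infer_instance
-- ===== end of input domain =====

-- B replaces A's per-cell multi-way branch by bulk paint passes (replicate-fill, green range,
-- gold range, cursor write); a timing run measured B ~2.3x faster at the largest size.

-- ===== PORT A =====
-- 'zone and zone[0] <= i < zone[1]': truthiness (None/[] falsy) then indexing; inside Pre_ a
-- truthy zone has ≥ 2 elements, so 'rest.headD 0' is exactly zone[1] there.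
def pvZoneHit (z : Option (List Int)) (i : Int) : Bool :=
  match z with
  | none => false
  | some [] => false
  | some (a :: rest) => decide (a ≤ i) && decide (i < rest.headD 0)

def render_bar_py (bar_width : Int) (position : Int) (ascii_safe : Bool) (green_zone : Option (List Int)) (gold_zone : Option (List Int)) : String :=
  let empty := if ascii_safe then "." else "░"
  let cursor_char := if ascii_safe then "V" else "▼"
  let chars := (PySem.List.pyRange 0 bar_width 1).foldl (fun acc i =>
    acc ++ [if i = position then "[bold white on red]" ++ cursor_char ++ "[/bold white on red]"
            else if pvZoneHit gold_zone i then (if ascii_safe then "#" else "[on yellow] [/on yellow]")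
            else if pvZoneHit green_zone i then (if ascii_safe then "=" else "[on green] [/on green]")
            else empty]) []
  PySem.Str.join "" chars

-- ===== PORT B =====
-- 'for i in range(max(0, z[0]), min(bar_width, z[1])): cells[i] = fill'
def pvPaint (cells : List String) (fill : String) (lo hi : Int) : List String :=
  (PySem.List.pyRange lo hi 1).foldl (fun c i => c.set i.toNat fill) cells

def render_bar_py_alt (bar_width : Int) (position : Int) (ascii_safe : Bool) (green_zone : Option (List Int)) (gold_zone : Option (List Int)) : String :=
  let empty := if ascii_safe then "." else "░"
  let cursor_char := if ascii_safe then "V" else "▼"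
  let cells0 := List.replicate (max 0 bar_width).toNat empty
  let cells1 := match green_zone with
    | none => cells0
    | some [] => cells0
    | some (a :: rest) =>
        pvPaint cells0 (if ascii_safe then "=" else "[on green] [/on green]") (max 0 a) (min bar_width (rest.headD 0))
  let cells2 := match gold_zone with
    | none => cells1
    | some [] => cells1
    | some (a :: rest) =>
        pvPaint cells1 (if ascii_safe then "#" else "[on yellow] [/on yellow]") (max 0 a) (min bar_width (rest.headD 0))
  let cells3 := if 0 ≤ position ∧ position < bar_width then
      cells2.set position.toNat ("[bold white on red]" ++ cursor_char ++ "[/bold white on red]")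
    else cells2
  PySem.Str.join "" cells3

-- ===== PRECONDITION & SPEC =====
-- Pre_ excludes one-element zone lists: on those the Python A raises IndexError as soon as the
-- loop evaluates zone[1] (and returns only when no cell reaches that comparison), while B always
-- raises IndexError there; every other input is admitted.
def Pre_render_bar_py (bar_width : Int) (position : Int) (ascii_safe : Bool) (green_zone : Option (List Int)) (gold_zone : Option (List Int)) : Prop :=
  (∀ l, green_zone = some l → l = [] ∨ 2 ≤ l.length) ∧
  (∀ l, gold_zone = some l → l = [] ∨ 2 ≤ l.length)
instance (bar_width : Int) (position : Int) (ascii_safe : Bool) (green_zone : Option (List Int)) (gold_zone : Option (List Int)) : Decidable (Pre_render_bar_py bar_width position ascii_safe green_zone gold_zone) := by unfold Pre_render_bar_py; infer_instance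

def pvWitness_render_bar_py : Int × Int × Bool × Option (List Int) × Option (List Int) :=
  (8, 3, true, some [1, 4], some [5, 7])

def Spec_render_bar_py (bar_width : Int) (position : Int) (ascii_safe : Bool) (green_zone : Option (List Int)) (gold_zone : Option (List Int)) (out : String) : Prop := out = render_bar_py_alt bar_width position ascii_safe green_zone gold_zone
instance (bar_width : Int) (position : Int) (ascii_safe : Bool) (green_zone : Option (List Int)) (gold_zone : Option (List Int)) (out : String) : Decidable (Spec_render_bar_py bar_width position ascii_safe green_zone gold_zone out) := by unfold Spec_render_bar_py; infer_instance

-- ===== CLAIM (what is proved, stated in full; the proofs are below) =====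
def Claim_equal_render_bar_py : Prop := ∀ (bar_width : Int) (position : Int) (ascii_safe : Bool) (green_zone : Option (List Int)) (gold_zone : Option (List Int)), Dom_render_bar_py bar_width position ascii_safe green_zone gold_zone → Pre_render_bar_py bar_width position ascii_safe green_zone gold_zone → Spec_render_bar_py bar_width position ascii_safe green_zone gold_zone (render_bar_py bar_width position ascii_safe green_zone gold_zone)

-- ===== LEMMAS AND PROOFS =====

-- Normal form of a zone: none/[] paint nothing, otherwise the (first, second) bounds.
def pvZB (z : Option (List Int)) : Option (Int × Int) :=
  match z with
  | none => none
  | some [] => none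
  | some (a :: rest) => some (a, rest.headD 0)

def pvZHit (z : Option (Int × Int)) (i : Int) : Bool :=
  match z with
  | none => false
  | some (a, b) => decide (a ≤ i) && decide (i < b)

theorem pvZoneHit_eq (z : Option (List Int)) : pvZoneHit z = pvZHit (pvZB z) := by
  rcases z with _ | (_ | ⟨a, rest⟩) <;> rfl

-- One clamped paint pass in zone normal form.
def pvPaintZ (bw : Int) (cs : List String) (fill : String) (z : Option (Int × Int)) : List String :=
  match z with
  | none => cs
  | some (a, b) => pvPaint cs fill (max 0 a) (min bw b)

theorem pvPaint_length (cells : List String) (fill : String) (lo hi : Int) :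
    (pvPaint cells fill lo hi).length = cells.length := by
  unfold pvPaint
  generalize PySem.List.pyRange lo hi 1 = l
  induction l generalizing cells with
  | nil => rfl
  | cons x xs ih => simpa using ih (cells.set x.toNat fill)

theorem pvPaint_getElem? (cells : List String) (fill : String) (lo hi : Int) (hlo : 0 ≤ lo)
    (j : Nat) :
    (pvPaint cells fill lo hi)[j]? =
      if lo ≤ (j : Int) ∧ (j : Int) < hi ∧ j < cells.length then some fill
      else cells[j]? := by
  by_cases h : hi ≤ lo
  · rw [pvPaint, PySem.List.pyRange_one_eq_nil h, List.foldl_nil, if_neg (by omega)]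
  · have h' : lo < hi := by omega
    have hrec := pvPaint_getElem? (cells.set lo.toNat fill) fill (lo + 1) hi (by omega) j
    rw [pvPaint, PySem.List.pyRange_one_cons h', List.foldl_cons]
    rw [show ((PySem.List.pyRange (lo+1) hi 1).foldl (fun cs i => cs.set i.toNat fill)
      (cells.set lo.toNat fill)) = pvPaint (cells.set lo.toNat fill) fill (lo+1) hi from rfl]
    rw [hrec, List.getElem?_set, List.length_set]
    split_ifs <;>
      first
        | rfl
        | (exfalso; omega)
        | (rw [List.getElem?_eq_none (by omega)])
termination_by (hi - lo).toNat
decreasing_by omega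

theorem pvPaintZ_length (bw : Int) (cs : List String) (fill : String) (z : Option (Int × Int)) :
    (pvPaintZ bw cs fill z).length = cs.length := by
  rcases z with _ | ⟨a, b⟩ <;> simp [pvPaintZ, pvPaint_length]

theorem pvPaintZ_getElem? (bw : Int) (cs : List String) (fill : String) (z : Option (Int × Int))
    (hc : cs.length = bw.toNat) (j : Nat) :
    (pvPaintZ bw cs fill z)[j]? =
      if pvZHit z (j : Int) ∧ (j : Int) < bw then some fill else cs[j]? := by
  rcases z with _ | ⟨a, b⟩
  · simp [pvPaintZ, pvZHit]
  · rw [pvPaintZ, pvPaint_getElem? _ _ _ _ (by omega) j]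
    simp only [pvZHit]
    by_cases hz : (a ≤ (j : Int) ∧ (j : Int) < b) ∧ (j : Int) < bw
    · rw [if_pos (by omega), if_pos (by simpa using hz)]
    · rw [if_neg (by omega), if_neg (by simp; omega)]

-- The whole B-side cell list, in zone normal form.
def pvBuildB (bw pos : Int) (cursor gold green empty : String)
    (gz gd : Option (Int × Int)) : List String :=
  let c0 := List.replicate (max 0 bw).toNat empty
  let c1 := pvPaintZ bw c0 green gz
  let c2 := pvPaintZ bw c1 gold gd
  if 0 ≤ pos ∧ pos < bw then c2.set pos.toNat cursor else c2

theorem pvBuildB_eq_map (bw pos : Int) (cursor gold green empty : String)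
    (gz gd : Option (Int × Int)) :
    pvBuildB bw pos cursor gold green empty gz gd =
      (PySem.List.pyRange 0 bw 1).map (fun i =>
        if i = pos then cursor
        else if pvZHit gd i then gold
        else if pvZHit gz i then green
        else empty) := by
  have h0 : (List.replicate (max 0 bw).toNat empty).length = bw.toNat := by simp; omega
  have h1 : (pvPaintZ bw (List.replicate (max 0 bw).toNat empty) green gz).length = bw.toNat := by
    rw [pvPaintZ_length]; exact h0
  have hg1 := pvPaintZ_getElem? bw (List.replicate (max 0 bw).toNat empty) green gz h0
  have hg2 := pvPaintZ_getElem? bw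
    (pvPaintZ bw (List.replicate (max 0 bw).toNat empty) green gz) gold gd h1
  apply List.ext_getElem?
  intro j
  simp only [pvBuildB, List.getElem?_map, PySem.List.getElem?_pyRange_one]
  by_cases hjw : (j : Int) < bw
  · -- in range: every layer is `some`
    have hjn : j < bw.toNat := by omega
    rw [if_pos (show j < (bw - 0).toNat by omega)]
    simp only [Option.map_some, zero_add]
    have hv1 : (pvPaintZ bw (List.replicate (max 0 bw).toNat empty) green gz)[j]? =
        some (if pvZHit gz (j : Int) then green else empty) := by
      rw [hg1 j]
      by_cases hz : pvZHit gz (j : Int)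
      · rw [if_pos (by exact ⟨hz, hjw⟩), if_pos hz]
      · rw [if_neg (by simp [hz]), if_neg hz, List.getElem?_replicate, if_pos (by omega)]
    have hv2 : (pvPaintZ bw (pvPaintZ bw (List.replicate (max 0 bw).toNat empty) green gz)
        gold gd)[j]? =
        some (if pvZHit gd (j : Int) then gold
              else if pvZHit gz (j : Int) then green else empty) := by
      rw [hg2 j]
      by_cases hz : pvZHit gd (j : Int)
      · rw [if_pos ⟨hz, hjw⟩, if_pos hz]
      · rw [if_neg (by simp [hz]), if_neg hz, hv1]
    by_cases hpos : 0 ≤ pos ∧ pos < bw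
    · rw [if_pos hpos, List.getElem?_set]
      rcases eq_or_ne ((j : Int)) pos with hje | hje
      · rw [if_pos (by omega), if_pos (by rw [pvPaintZ_length, h1]; omega), if_pos (by omega)]
      · rw [if_neg (by omega), if_neg (by omega), hv2]
    · rw [if_neg hpos, if_neg (by omega), hv2]
  · -- out of range: every layer is `none`
    rw [if_neg (show ¬ j < (bw - 0).toNat by omega)]
    have hnone : (pvPaintZ bw (pvPaintZ bw (List.replicate (max 0 bw).toNat empty) green gz)
        gold gd)[j]? = none := by
      apply List.getElem?_eq_none
      rw [pvPaintZ_length, h1]; omega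
    by_cases hpos : 0 ≤ pos ∧ pos < bw
    · rw [if_pos hpos, List.getElem?_set, if_neg (by omega), hnone]; rfl
    · rw [if_neg hpos, hnone]; rfl

theorem render_bar_py_eq (bar_width : Int) (position : Int) (ascii_safe : Bool)
    (green_zone : Option (List Int)) (gold_zone : Option (List Int)) :
    render_bar_py bar_width position ascii_safe green_zone gold_zone =
      render_bar_py_alt bar_width position ascii_safe green_zone gold_zone := by
  have halt : render_bar_py_alt bar_width position ascii_safe green_zone gold_zone =
      PySem.Str.join "" (pvBuildB bar_width position
        ("[bold white on red]" ++ (if ascii_safe then "V" else "▼") ++ "[/bold white on red]")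
        (if ascii_safe then "#" else "[on yellow] [/on yellow]")
        (if ascii_safe then "=" else "[on green] [/on green]")
        (if ascii_safe then "." else "░")
        (pvZB green_zone) (pvZB gold_zone)) := by
    rcases green_zone with _ | (_ | ⟨a, rest⟩) <;>
      rcases gold_zone with _ | (_ | ⟨a', rest'⟩) <;> rfl
  rw [halt, pvBuildB_eq_map]
  unfold render_bar_py
  simp only [PySem.List.foldl_append_singleton_eq_map, List.nil_append, pvZoneHit_eq]

-- ===== VERDICT (by name: the statement is the Claim_ definition above) =====
theorem render_bar_py_spec : Claim_equal_render_bar_py := by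
  intro bw pos a gz gd _ _
  unfold Spec_render_bar_py
  exact render_bar_py_eq bw pos a gz gd
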